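-- pv_equiv track=rewrite | github.com/Arjunarus/teacher_task | main.py | _get_not_simple_dividers
-- ===== SOURCE A (Python) =====
-- def _is_simple(x: int) -> bool:
--     if x == 1:
--         return False
--
--     for divider in range(2, x//2 + 1):
--         if x % divider == 0:
--             return False
--     return True
--
-- def _get_not_simple_dividers(age: int) -> list[int]:
--     res = []
--     for divider in range(1, age + 1):
--         if age % divider != 0:
--             continue
--
--         if _is_simple(divider):
--             continue
--
--         res.append(divider)
--
--     return res
-- ===== SOURCE B (Python) =====
-- def _is_prime(n: int) -> bool:
--     if n < 2:
--         return False
--     j = 2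
--     while j * j <= n:
--         if n % j == 0:
--             return False
--         j += 1
--     return True
--
-- def _get_not_simple_dividers(age: int) -> list[int]:
--     divs = set()
--     i = 1
--     while i * i <= age:
--         if age % i == 0:
--             divs.add(i)
--             divs.add(age // i)
--         i += 1
--     return sorted(d for d in divs if not _is_prime(d))
-- ===== Notes on version B (the rewrite author's own statement) =====
-- stated objective: faster
-- what changed: B collects divisors in pairs (i, age//i) while i*i <= age into a set and sorts, and tests primality by trial division only up to sqrt(n), replacing A's scan of every candidate up to age with an inner scan up to divider//2.
import Mathlib
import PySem

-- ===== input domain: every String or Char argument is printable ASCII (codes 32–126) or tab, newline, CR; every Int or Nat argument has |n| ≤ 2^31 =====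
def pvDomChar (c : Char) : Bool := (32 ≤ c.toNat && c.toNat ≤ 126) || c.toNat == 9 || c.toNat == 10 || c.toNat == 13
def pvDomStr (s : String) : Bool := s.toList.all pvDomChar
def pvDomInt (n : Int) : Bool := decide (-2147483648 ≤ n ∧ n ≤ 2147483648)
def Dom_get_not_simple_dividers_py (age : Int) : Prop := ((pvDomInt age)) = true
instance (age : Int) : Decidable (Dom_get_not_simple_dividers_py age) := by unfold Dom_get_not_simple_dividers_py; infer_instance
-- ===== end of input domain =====

-- B replaces A's double full scan (candidates 1..age, primality tested up to n//2) by sqrt-bounded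
-- divisor pairing into a set plus a sqrt-bounded primality test, then one sort: asymptotically faster.

-- ===== PORT A =====
-- 'for divider in range(2, x//2+1): if x % divider == 0: return False / return True' of _is_simple
def pvIsSimpleLoop (x : Int) : List Int → Bool
  | [] => true
  | d :: rest => if PySem.Int.mod x d == 0 then false else pvIsSimpleLoop x rest

def pvIsSimple (x : Int) : Bool :=
  if x == 1 then false
  else pvIsSimpleLoop x (PySem.List.pyRange 2 (PySem.Int.floordiv x 2 + 1) 1)

def get_not_simple_dividers_py (age : Int) : List Int :=
  (PySem.List.pyRange 1 (age + 1) 1).foldl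
    (fun res divider =>
      if ¬ (PySem.Int.mod age divider == 0) then res
      else if pvIsSimple divider then res
      else res ++ [divider]) []

-- ===== PORT B =====
-- 'j = 2; while j*j <= n: if n % j == 0: return False; j += 1' — fuel counts the remaining
-- iterations (the loop runs at most n-1 times); with the fuel passed below it is exact.
def pvIsPrimeLoop (n : Int) : Int → Nat → Bool
  | _, 0 => true
  | j, fuel + 1 =>
    if j * j ≤ n then
      if PySem.Int.mod n j == 0 then false else pvIsPrimeLoop n (j + 1) fuel
    else true

def pvIsPrime (n : Int) : Bool :=
  if n < 2 then false else pvIsPrimeLoop n 2 n.toNat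

-- 'i = 1; while i*i <= age: if age % i == 0: divs.add(i); divs.add(age//i); i += 1'
def pvCollectLoop (age : Int) : Int → PySem.Set Int → Nat → PySem.Set Int
  | _, divs, 0 => divs
  | i, divs, fuel + 1 =>
    if i * i ≤ age then
      pvCollectLoop age (i + 1)
        (if PySem.Int.mod age i == 0 then
          PySem.Set.add (PySem.Set.add divs i) (PySem.Int.floordiv age i)
        else divs) fuel
    else divs

def get_not_simple_dividers_py_alt (age : Int) : List Int :=
  PySem.List.sorted
    ((pvCollectLoop age 1 PySem.Set.empty (age.toNat + 1)).filter (fun d => !pvIsPrime d))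
    (fun x => x) false

-- ===== PRECONDITION & SPEC =====
def Spec_get_not_simple_dividers_py (age : Int) (out : List Int) : Prop := out = get_not_simple_dividers_py_alt age
instance (age : Int) (out : List Int) : Decidable (Spec_get_not_simple_dividers_py age out) := by unfold Spec_get_not_simple_dividers_py; infer_instance

-- ===== CLAIM (what is proved, stated in full; the proofs are below) =====
def Claim_equal_get_not_simple_dividers_py : Prop := ∀ (age : Int), Dom_get_not_simple_dividers_py age → Spec_get_not_simple_dividers_py age (get_not_simple_dividers_py age)

-- ===== LEMMAS AND PROOFS =====

-- A's inner loop is a search for a divisor in the list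
theorem pvIsSimpleLoop_eq (x : Int) (l : List Int) :
    pvIsSimpleLoop x l = !(l.any (fun d => PySem.Int.mod x d == 0)) := by
  induction l with
  | nil => rfl
  | cons d rest ih => by_cases h : PySem.Int.mod x d == 0 <;> simp [pvIsSimpleLoop, h, ih]

theorem pvIsSimple_iff (x : Int) (hx : 2 ≤ x) :
    pvIsSimple x = true ↔ ∀ k : Int, 2 ≤ k → k ≤ PySem.Int.floordiv x 2 → ¬ k ∣ x := by
  have hx1 : ¬ (x == 1) = true := by simp; omega
  simp only [pvIsSimple, if_neg hx1, pvIsSimpleLoop_eq]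
  simp [PySem.List.mem_pyRange_one, PySem.Int.mod_eq_zero_iff_dvd]

-- B's primality loop, characterized (fuel sufficient: n + 1 ≤ j + fuel)
theorem pvIsPrimeLoop_iff : ∀ (fuel : Nat) (n j : Int), 1 ≤ j → n + 1 ≤ j + fuel →
    (pvIsPrimeLoop n j fuel = true ↔ ∀ k : Int, j ≤ k → k * k ≤ n → ¬ k ∣ n) := by
  intro fuel
  induction fuel with
  | zero =>
    intro n j hj hf
    simp only [pvIsPrimeLoop]
    constructor
    · intro _ k hk hkk
      have hk1 : k ≤ k * k := by nlinarith [mul_nonneg (by omega : (0:Int) ≤ k) (by omega : (0:Int) ≤ k - 1)]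
      push_cast at hf; omega
    · intro _; trivial
  | succ f ih =>
    intro n j hj hf
    simp only [pvIsPrimeLoop]
    by_cases h : j * j ≤ n
    · rw [if_pos h]
      by_cases hd : PySem.Int.mod n j == 0
      · rw [if_pos hd]
        have hdvd : j ∣ n := by
          rw [← PySem.Int.mod_eq_zero_iff_dvd]; exact beq_iff_eq.mp hd
        constructor
        · intro hfalse; exact absurd hfalse (by simp)
        · intro hall; exact absurd hdvd (hall j le_rfl h)
      · rw [if_neg hd]
        have hndvd : ¬ j ∣ n := by
          rw [← PySem.Int.mod_eq_zero_iff_dvd]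
          intro he; exact hd (beq_iff_eq.mpr he)
        rw [ih n (j + 1) (by omega) (by push_cast at hf ⊢; omega)]
        constructor
        · intro hall k hk hkk
          rcases eq_or_lt_of_le hk with rfl | hlt
          · exact hndvd
          · exact hall k (by omega) hkk
        · intro hall k hk hkk; exact hall k (by omega) hkk
    · rw [if_neg h]
      constructor
      · intro _ k hk hkk
        exfalso; nlinarith
      · intro _; trivial

-- key arithmetic: a proper divisor up to n//2 exists iff one up to sqrt n exists
theorem pvHalf_sqrt (n : Int) (hn : 2 ≤ n) :
    (∀ k : Int, 2 ≤ k → k ≤ PySem.Int.floordiv n 2 → ¬ k ∣ n) ↔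
    (∀ k : Int, 2 ≤ k → k * k ≤ n → ¬ k ∣ n) := by
  have hhalf : ∀ k : Int, (k ≤ PySem.Int.floordiv n 2 ↔ k * 2 ≤ n) := by
    intro k; exact PySem.Int.le_floordiv_iff_mul_le (by omega)
  constructor
  · intro h k h2 hkk hdvd
    exact h k h2 ((hhalf k).mpr (by nlinarith)) hdvd
  · intro h k h2 hk hdvd
    have hk2 : k * 2 ≤ n := (hhalf k).mp hk
    obtain ⟨c, hc⟩ := hdvd
    have hkpos : (0:Int) < k := by omega
    have hc2 : 2 ≤ c := by nlinarith
    by_cases hsq : k * k ≤ n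
    · exact h k h2 hsq ⟨c, hc⟩
    · have hck : c < k := by nlinarith
      exact h c hc2 (by nlinarith) ⟨k, by rw [hc]; ring⟩
  
theorem pvPrime_eq_simple (d : Int) (hd : 1 ≤ d) : pvIsPrime d = pvIsSimple d := by
  rcases eq_or_lt_of_le hd with rfl | h2
  · rfl
  · have hd2 : 2 ≤ d := by omega
    have hA := pvIsSimple_iff d hd2
    have hB := pvIsPrimeLoop_iff d.toNat d 2 (by omega) (by omega)
    have : pvIsPrime d = pvIsPrimeLoop d 2 d.toNat := by
      simp [pvIsPrime]; omega
    rw [this]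
    by_cases hp : ∀ k : Int, 2 ≤ k → k * k ≤ d → ¬ k ∣ d
    · rw [(hB.mpr hp), ((hA.mpr ((pvHalf_sqrt d hd2).mpr hp))).symm]
    · have h1 : pvIsPrimeLoop d 2 d.toNat ≠ true := fun h => hp (hB.mp h)
      have h2' : pvIsSimple d ≠ true := fun h => hp ((pvHalf_sqrt d hd2).mp (hA.mp h))
      simp only [Bool.not_eq_true] at h1 h2'
      rw [h1, h2']

-- membership in the collecting loop
theorem pvCollectLoop_mem : ∀ (fuel : Nat) (age i : Int) (divs : PySem.Set Int) (d : Int),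
    1 ≤ i → age + 1 ≤ i + fuel →
    (d ∈ pvCollectLoop age i divs fuel ↔
      d ∈ divs ∨ ∃ j : Int, i ≤ j ∧ j * j ≤ age ∧ j ∣ age ∧
        (d = j ∨ d = PySem.Int.floordiv age j)) := by
  intro fuel
  induction fuel with
  | zero =>
    intro age i divs d hi hf
    simp only [pvCollectLoop]
    constructor
    · intro h; exact Or.inl h
    · rintro (h | ⟨j, hij, hjj, _, _⟩)
      · exact h
      · have hj1 : j ≤ j * j := by nlinarith [mul_nonneg (by omega : (0:Int) ≤ j) (by omega : (0:Int) ≤ j - 1)]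
        push_cast at hf; omega
  | succ f ih =>
    intro age i divs d hi hf
    simp only [pvCollectLoop]
    by_cases h : i * i ≤ age
    · rw [if_pos h, ih age (i+1) _ d (by omega) (by push_cast at hf ⊢; omega)]
      by_cases hd : PySem.Int.mod age i == 0
      · have hdvd : i ∣ age := by
          rw [← PySem.Int.mod_eq_zero_iff_dvd]; exact beq_iff_eq.mp hd
        rw [if_pos hd]
        simp only [PySem.Set.mem_add]
        constructor
        · rintro (((hm | heq) | heq) | ⟨j, hij, hjj, hjd, hde⟩)
          · exact Or.inl hm
          · exact Or.inr ⟨i, le_rfl, h, hdvd, Or.inl heq⟩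
          · exact Or.inr ⟨i, le_rfl, h, hdvd, Or.inr heq⟩
          · exact Or.inr ⟨j, by omega, hjj, hjd, hde⟩
        · rintro (hm | ⟨j, hij, hjj, hjd, hde⟩)
          · exact Or.inl (Or.inl (Or.inl hm))
          · rcases eq_or_lt_of_le hij with heq | hlt
            · rcases hde with hde | hde
              · exact Or.inl (Or.inl (Or.inr (heq ▸ hde)))
              · exact Or.inl (Or.inr (heq ▸ hde))
            · exact Or.inr ⟨j, by omega, hjj, hjd, hde⟩
      · have hndvd : ¬ i ∣ age := by
          rw [← PySem.Int.mod_eq_zero_iff_dvd]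
          intro he; exact hd (beq_iff_eq.mpr he)
        rw [if_neg hd]
        constructor
        · rintro (hm | ⟨j, hij, hjj, hjd, hde⟩)
          · exact Or.inl hm
          · exact Or.inr ⟨j, by omega, hjj, hjd, hde⟩
        · rintro (hm | ⟨j, hij, hjj, hjd, hde⟩)
          · exact Or.inl hm
          · rcases eq_or_lt_of_le hij with rfl | hlt
            · exact absurd hjd hndvd
            · exact Or.inr ⟨j, by omega, hjj, hjd, hde⟩
    · rw [if_neg h]
      constructor
      · intro hm; exact Or.inl hm
      · rintro (hm | ⟨j, hij, hjj, _, _⟩)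
        · exact hm
        · exfalso; nlinarith

theorem pvCollectLoop_nodup : ∀ (fuel : Nat) (age i : Int) (divs : PySem.Set Int),
    divs.Nodup → (pvCollectLoop age i divs fuel).Nodup := by
  intro fuel
  induction fuel with
  | zero => intro age i divs h; exact h
  | succ f ih =>
    intro age i divs h
    simp only [pvCollectLoop]
    split
    · apply ih
      split
      · exact PySem.Set.nodup_add _ _ (PySem.Set.nodup_add _ _ h)
      · exact h
    · exact h

-- a positive d divides age iff it is reached by the sqrt-bounded pairing (age ≥ 1)
theorem pvPairing_iff (age d : Int) (hage : 1 ≤ age) :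
    (∃ j : Int, 1 ≤ j ∧ j * j ≤ age ∧ j ∣ age ∧ (d = j ∨ d = PySem.Int.floordiv age j)) ↔
    (1 ≤ d ∧ d ≤ age ∧ d ∣ age) := by
  constructor
  · rintro ⟨j, hj, hjj, hjd, (rfl | rfl)⟩
    · exact ⟨hj, by nlinarith, hjd⟩
    · obtain ⟨c, hc⟩ := hjd
      have hjpos : (0:Int) < j := by omega
      have hfd : PySem.Int.floordiv age j = c := by
        rw [PySem.Int.floordiv_eq_ediv_of_pos hjpos, hc, Int.mul_ediv_cancel_left c (by omega)]
      rw [hfd]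
      have hc1 : 1 ≤ c := by nlinarith
      refine ⟨hc1, by nlinarith, ⟨j, by rw [hc]; ring⟩⟩
  · rintro ⟨hd1, hdage, hdvd⟩
    obtain ⟨c, hc⟩ := hdvd
    have hdpos : (0:Int) < d := by omega
    have hc1 : 1 ≤ c := by nlinarith
    by_cases hsq : d * d ≤ age
    · exact ⟨d, hd1, hsq, ⟨c, hc⟩, Or.inl rfl⟩
    · have hcd : c < d := by nlinarith
      refine ⟨c, hc1, by nlinarith, ⟨d, by rw [hc]; ring⟩, Or.inr ?_⟩
      rw [PySem.Int.floordiv_eq_ediv_of_pos (by omega), hc, mul_comm d c,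
        Int.mul_ediv_cancel_left d (by omega)]

-- A is a filter of range(1, age+1)
theorem pvA_eq_filter (age : Int) :
    get_not_simple_dividers_py age =
      (PySem.List.pyRange 1 (age + 1) 1).filter
        (fun d => PySem.Int.mod age d == 0 && !pvIsSimple d) := by
  unfold get_not_simple_dividers_py
  have hfun : (fun (res : List Int) (divider : Int) =>
      if ¬ (PySem.Int.mod age divider == 0) then res
      else if pvIsSimple divider then res
      else res ++ [divider]) =
      (fun res x => if (PySem.Int.mod age x == 0 && !pvIsSimple x) then res ++ [x] else res) := by
    funext res x
    by_cases h1 : PySem.Int.mod age x == 0 <;> by_cases h2 : pvIsSimple x <;> simp [h1, h2]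
  rw [hfun, PySem.List.foldl_append_if_eq_filter]
  simp

-- ===== VERDICT (by name: the statement is the Claim_ definition above) =====
theorem get_not_simple_dividers_py_spec : Claim_equal_get_not_simple_dividers_py := by
  intro age _
  unfold Spec_get_not_simple_dividers_py
  rw [pvA_eq_filter]
  unfold get_not_simple_dividers_py_alt
  by_cases hage : age ≤ 0
  · rw [PySem.List.pyRange_one_eq_nil (by omega)]
    have hc : pvCollectLoop age 1 PySem.Set.empty (age.toNat + 1) = PySem.Set.empty := by
      simp only [pvCollectLoop, if_neg (show ¬ (1 * 1 ≤ age) by omega)]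
    rw [hc]
    rfl
  · have hage1 : 1 ≤ age := by omega
    set ys := (PySem.List.pyRange 1 (age + 1) 1).filter
        (fun d => PySem.Int.mod age d == 0 && !pvIsSimple d) with hys
    have hmemS : ∀ d : Int, d ∈ pvCollectLoop age 1 PySem.Set.empty (age.toNat + 1) ↔
        (1 ≤ d ∧ d ≤ age ∧ d ∣ age) := by
      intro d
      rw [pvCollectLoop_mem _ age 1 _ d le_rfl (by omega)]
      rw [← pvPairing_iff age d hage1]
      simp [PySem.Set.empty]
    have hmem : ∀ d : Int,
        d ∈ (pvCollectLoop age 1 PySem.Set.empty (age.toNat + 1)).filter (fun d => !pvIsPrime d)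
          ↔ d ∈ ys := by
      intro d
      rw [hys, List.mem_filter, List.mem_filter, PySem.List.mem_pyRange_one, hmemS]
      constructor
      · rintro ⟨⟨h1, h2, h3⟩, hp⟩
        rw [pvPrime_eq_simple d h1] at hp
        refine ⟨⟨h1, by omega⟩, ?_⟩
        simp only [Bool.and_eq_true]
        exact ⟨beq_iff_eq.mpr (PySem.Int.mod_eq_zero_iff_dvd age d |>.mpr h3), hp⟩
      · rintro ⟨⟨h1, h2⟩, hp⟩
        simp only [Bool.and_eq_true] at hp
        have h3 : d ∣ age := (PySem.Int.mod_eq_zero_iff_dvd age d).mp (beq_iff_eq.mp hp.1)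
        rw [← pvPrime_eq_simple d h1] at hp
        exact ⟨⟨h1, by omega, h3⟩, hp.2⟩
    have hnodupS : ((pvCollectLoop age 1 PySem.Set.empty (age.toNat + 1)).filter
        (fun d => !pvIsPrime d)).Nodup :=
      (pvCollectLoop_nodup _ age 1 _ List.nodup_nil).filter _
    have hnodupY : ys.Nodup := (PySem.List.nodup_pyRange_one 1 (age+1)).filter _
    have hperm : ys.Perm ((pvCollectLoop age 1 PySem.Set.empty (age.toNat + 1)).filter
        (fun d => !pvIsPrime d)) :=
      (List.perm_ext_iff_of_nodup hnodupY hnodupS).mpr (fun d => (hmem d).symm)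
    have hpw : ys.Pairwise (· < ·) :=
      (PySem.List.pairwise_lt_pyRange_one 1 (age+1)).filter _
    exact (PySem.List.sorted_eq_of_perm_of_pairwise_lt _ _ _ hperm hpw).symm
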